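-- pv_equiv track=rewrite | github.com/miliar/Code_Jam_Webscraper | Solutions_python/Problem_181/1668.py | solve
-- ===== SOURCE A (Python) =====
-- def solve(s):
--     whiteboard = [s[0]]
--     for c in s[1:]:
--         if c >= whiteboard[0]:
--             whiteboard = list(c)+whiteboard
--         else:
--             whiteboard.append(c)
--     return "".join(whiteboard)
-- ===== SOURCE B (Python) =====
-- def solve(s):
--     # pass 1: mark prefix-maximum "records"
--     m = s[0]
--     flags = []
--     for c in s:
--         if c >= m:
--             m = c
--             flags.append(True)
--         else:
--             flags.append(False)
--     # pass 2: counted placement into a preallocated buffer with two write pointers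
--     k = sum(flags)
--     out = [None] * len(s)
--     i = k - 1          # records fill positions k-1 .. 0 (right-to-left)
--     j = k              # non-records fill positions k .. n-1 (left-to-right)
--     for c, f in zip(s, flags):
--         if f:
--             out[i] = c
--             i -= 1
--         else:
--             out[j] = c
--             j += 1
--     return ''.join(out)
-- ===== Notes on version B (the rewrite author's own statement) =====
-- stated objective: faster
-- what changed: B replaces A's live list rebuilding (prepending list(c)+whiteboard on each new maximum, which copies the whole list) by two staged passes: a prefix-maximum flag pass, then a counted placement of every character into a preallocated output buffer via two write pointers (records right-to-left into the front region, the rest left-to-right into the back region).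
import Mathlib
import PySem

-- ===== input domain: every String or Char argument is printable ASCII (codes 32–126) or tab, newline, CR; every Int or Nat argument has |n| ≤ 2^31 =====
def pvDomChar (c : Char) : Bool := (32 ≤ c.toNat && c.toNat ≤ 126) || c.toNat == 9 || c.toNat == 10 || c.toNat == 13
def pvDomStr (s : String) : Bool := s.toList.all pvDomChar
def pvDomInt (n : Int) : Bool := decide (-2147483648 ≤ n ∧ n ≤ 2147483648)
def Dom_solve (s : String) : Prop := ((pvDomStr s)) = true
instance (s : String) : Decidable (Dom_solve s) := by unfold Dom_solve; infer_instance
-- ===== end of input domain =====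

-- B replaces A's live list rebuilding by two staged passes: a prefix-maximum flag
-- pass, then counted placement into a preallocated buffer with two write pointers.

-- ===== PORT A =====
-- loop body of A: 'if c >= whiteboard[0]: whiteboard = list(c)+whiteboard else: whiteboard.append(c)'
-- (whiteboard is never empty inside the loop, so whiteboard[0] = wb.head!)
def solveStep (wb : List Char) (c : Char) : List Char :=
  if wb.head! ≤ c then c :: wb else wb ++ [c]

def solve (s : String) : String :=
  match s.toList with
  | [] => ""            -- unreachable: Python raises IndexError on s[0]; excluded by Pre_solve
  | c :: rest => String.ofList (rest.foldl solveStep [c])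

-- ===== PORT B =====
-- pass-1 loop body: state (m, flags)
def flagStep (st : Char × List Bool) (c : Char) : Char × List Bool :=
  if st.1 ≤ c then (c, st.2 ++ [true]) else (st.1, st.2 ++ [false])

-- pass-2 loop body: state (out, i, j); indices are Python ints, always in range when written
def placeStep (st : List (Option Char) × Int × Int) (p : Char × Bool) :
    List (Option Char) × Int × Int :=
  if p.2 then (st.1.set st.2.1.toNat (some p.1), st.2.1 - 1, st.2.2)
  else (st.1.set st.2.2.toNat (some p.1), st.2.1, st.2.2 + 1)

def solve_alt (s : String) : String :=
  match s.toList with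
  | [] => ""            -- unreachable: Python raises IndexError on s[0]; excluded by Pre_solve
  | c0 :: rest =>
    let cs := c0 :: rest
    let fl := (cs.foldl flagStep (c0, [])).2
    let k : Int := (fl.countP id : Nat)
    let out0 : List (Option Char) := List.replicate cs.length none
    let st := (cs.zip fl).foldl placeStep (out0, k - 1, k)
    String.ofList (st.1.map Option.get!)

-- ===== PRECONDITION & SPEC =====
-- Pre_ excludes only the empty string, on which A raises IndexError (s[0]).
def Pre_solve (s : String) : Prop := s ≠ ""
instance (s : String) : Decidable (Pre_solve s) := by unfold Pre_solve; infer_instance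
def pvWitness_solve : String := "bcab"

def Spec_solve (s : String) (out : String) : Prop := out = solve_alt s
instance (s : String) (out : String) : Decidable (Spec_solve s out) := by unfold Spec_solve; infer_instance

-- ===== CLAIM (what is proved, stated in full; the proofs are below) =====
def Claim_equal_solve : Prop := ∀ (s : String), Dom_solve s → Pre_solve s → Spec_solve s (solve s)

-- ===== LEMMAS AND PROOFS =====

-- specification skeleton: (records, others) of the remaining characters, given the running max
def goRO (m : Char) : List Char → List Char × List Char
  | [] => ([], [])
  | c :: cs =>
    if m ≤ c then ((c :: (goRO c cs).1), (goRO c cs).2)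
    else ((goRO m cs).1, (c :: (goRO m cs).2))

def flagsOf (m : Char) : List Char → List Bool
  | [] => []
  | c :: cs => if m ≤ c then true :: flagsOf c cs else false :: flagsOf m cs

def recsP (ps : List (Char × Bool)) : List Char := (ps.filter (·.2)).map (·.1)
def othersP (ps : List (Char × Bool)) : List Char := (ps.filter (fun p => !p.2)).map (·.1)

-- A's fold keeps whiteboard = (new records).reverse ++ (m :: t) ++ oo ++ (new others)
theorem solveA_key (cs : List Char) : ∀ (m : Char) (t oo : List Char),
    cs.foldl solveStep ((m :: t) ++ oo) =
      (goRO m cs).1.reverse ++ (m :: t) ++ oo ++ (goRO m cs).2 := by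
  induction cs with
  | nil => intro m t oo; simp [goRO]
  | cons c cs ih =>
    intro m t oo
    by_cases h : m ≤ c
    · have hA : solveStep ((m :: t) ++ oo) c = (c :: (m :: t)) ++ oo := by
        simp [solveStep, h]
      simp only [List.foldl_cons, hA, goRO, if_pos h]
      have := ih c (m :: t) oo
      rw [this]; simp
    · have hA : solveStep ((m :: t) ++ oo) c = (m :: t) ++ (oo ++ [c]) := by
        simp [solveStep, h]
      simp only [List.foldl_cons, hA, goRO, if_neg h]
      have := ih m t (oo ++ [c])
      rw [this]; simp

-- the flag fold appends flagsOf to the accumulator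
theorem flagFold_key (cs : List Char) : ∀ (m : Char) (fl0 : List Bool),
    (cs.foldl flagStep (m, fl0)).2 = fl0 ++ flagsOf m cs := by
  induction cs with
  | nil => intro m fl0; simp [flagsOf]
  | cons c cs ih =>
    intro m fl0
    by_cases h : m ≤ c
    · simp only [List.foldl_cons, flagStep, if_pos h, flagsOf]
      rw [ih c (fl0 ++ [true])]; simp
    · simp only [List.foldl_cons, flagStep, if_neg h, flagsOf]
      rw [ih m (fl0 ++ [false])]; simp

theorem recsP_zip (cs : List Char) : ∀ m, recsP (cs.zip (flagsOf m cs)) = (goRO m cs).1 := by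
  induction cs with
  | nil => intro m; simp [flagsOf, goRO, recsP]
  | cons c cs ih =>
    intro m
    by_cases h : m ≤ c
    · simp [flagsOf, goRO, if_pos h, recsP] at ih ⊢; exact ih c
    · simp [flagsOf, goRO, if_neg h, recsP] at ih ⊢; exact ih m

theorem othersP_zip (cs : List Char) : ∀ m, othersP (cs.zip (flagsOf m cs)) = (goRO m cs).2 := by
  induction cs with
  | nil => intro m; simp [flagsOf, goRO, othersP]
  | cons c cs ih =>
    intro m
    by_cases h : m ≤ c
    · simp [flagsOf, goRO, if_pos h, othersP] at ih ⊢; exact ih c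
    · simp [flagsOf, goRO, if_neg h, othersP] at ih ⊢; exact ih m

theorem countP_flagsOf (cs : List Char) : ∀ m,
    (flagsOf m cs).countP id = (goRO m cs).1.length := by
  induction cs with
  | nil => intro m; simp [flagsOf, goRO]
  | cons c cs ih =>
    intro m
    by_cases h : m ≤ c
    · simp [flagsOf, goRO, if_pos h, ih c]
    · simp [flagsOf, goRO, if_neg h, ih m]

theorem goRO_length (cs : List Char) : ∀ m,
    (goRO m cs).1.length + (goRO m cs).2.length = cs.length := by
  induction cs with
  | nil => intro m; simp [goRO]
  | cons c cs ih =>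
    intro m
    by_cases h : m ≤ c
    · simp [goRO, if_pos h]; have := ih c; omega
    · simp [goRO, if_neg h]; have := ih m; omega

theorem set_at_length {α : Type} (X : List α) (w : α) (W : List α) (v : α) :
    (X ++ w :: W).set X.length v = X ++ v :: W := by
  induction X with
  | nil => rfl
  | cons x X ih => simp [ih]

-- placement fold: records go right-to-left into X, others left-to-right into Z, Y untouched
theorem place_key (ps : List (Char × Bool)) :
    ∀ (X Y Z : List (Option Char)) (i j : Int),
    i + 1 = (X.length : Int) → j = (X.length : Int) + (Y.length : Int) →
    X.length = (recsP ps).length → (othersP ps).length ≤ Z.length →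
    (ps.foldl placeStep (X ++ Y ++ Z, i, j)).1 =
      ((recsP ps).reverse.map some) ++ Y ++ ((othersP ps).map some) ++ Z.drop (othersP ps).length := by
  induction ps with
  | nil =>
    intro X Y Z i j hi hj hX hZ
    have : X = [] := List.eq_nil_of_length_eq_zero (by simpa [recsP] using hX)
    simp [this, recsP, othersP]
  | cons p ps ih =>
    intro X Y Z i j hi hj hX hZ
    obtain ⟨c, f⟩ := p
    cases f with
    | true =>
      have hrec : recsP ((c, true) :: ps) = c :: recsP ps := by simp [recsP]
      have hoth : othersP ((c, true) :: ps) = othersP ps := by simp [othersP]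
      rw [hrec, hoth]
      rw [hrec] at hX
      rw [hoth] at hZ
      rcases List.eq_nil_or_concat X with hX0 | ⟨X', x, hXc⟩
      · rw [hX0] at hX; simp at hX
      subst hXc
      rw [List.concat_eq_append] at hi hj hX ⊢
      have hX' : X'.length = (recsP ps).length := by simp at hX; omega
      have hiN : i.toNat = X'.length := by simp at hi; omega
      have hstep : placeStep (X' ++ [x] ++ Y ++ Z, i, j) (c, true)
          = ((X' ++ [x] ++ Y ++ Z).set i.toNat (some c), i - 1, j) := by
        simp [placeStep]
      have hset : ((X' ++ [x]) ++ Y ++ Z).set i.toNat (some c) = X' ++ (some c :: Y) ++ Z := by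
        rw [hiN]
        have h1 : (X' ++ [x]) ++ Y ++ Z = X' ++ x :: (Y ++ Z) := by simp
        rw [h1, set_at_length]; simp
      rw [List.foldl_cons, hstep]
      simp only [List.append_assoc] at hset ⊢
      rw [hset]
      have hih := ih X' (some c :: Y) Z (i - 1) j
        (by simp at hi ⊢; omega)
        (by simp at hj ⊢; omega)
        hX' hZ
      simp only [List.append_assoc] at hih
      rw [hih]
      simp
    | false =>
      have hrec : recsP ((c, false) :: ps) = recsP ps := by simp [recsP]
      have hoth : othersP ((c, false) :: ps) = c :: othersP ps := by simp [othersP]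
      rw [hrec, hoth]
      rw [hrec] at hX
      rw [hoth] at hZ
      rcases Z with _ | ⟨z, Z'⟩
      · simp at hZ
      have hjN : j.toNat = X.length + Y.length := by omega
      have hstep : placeStep (X ++ Y ++ z :: Z', i, j) (c, false)
          = ((X ++ Y ++ z :: Z').set j.toNat (some c), i, j + 1) := by
        simp [placeStep]
      have hset : (X ++ Y ++ z :: Z').set j.toNat (some c) = X ++ (Y ++ [some c]) ++ Z' := by
        rw [hjN]
        have h1 : X ++ Y ++ z :: Z' = (X ++ Y) ++ z :: Z' := by simp
        have h2 : X.length + Y.length = (X ++ Y).length := by simp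
        rw [h1, h2, set_at_length]; simp
      rw [List.foldl_cons, hstep]
      simp only [List.append_assoc] at hset ⊢
      rw [hset]
      have hih := ih X (Y ++ [some c]) Z' i (j + 1)
        hi (by simp at hj ⊢; omega) hX (by simp at hZ ⊢; omega)
      simp only [List.append_assoc] at hih
      rw [hih]
      simp

-- ===== VERDICT (by name: the statement is the Claim_ definition above) =====
theorem solve_spec : Claim_equal_solve := by
  intro s _ hpre
  unfold Spec_solve solve solve_alt
  cases hs : s.toList with
  | nil => exact absurd (String.toList_eq_nil_iff.mp hs) hpre
  | cons c0 rest =>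
    -- abbreviations
    set R : List Char := (goRO c0 (c0 :: rest)).1 with hR
    set O : List Char := (goRO c0 (c0 :: rest)).2 with hO
    -- A's side
    have hgo : goRO c0 (c0 :: rest) = (c0 :: (goRO c0 rest).1, (goRO c0 rest).2) := by
      simp [goRO]
    have hA : rest.foldl solveStep [c0] = R.reverse ++ O := by
      have := solveA_key rest c0 [] []
      simp at this
      rw [this, hR, hO, hgo]; simp
    -- B's side
    have hfl : ((c0 :: rest).foldl flagStep (c0, [])).2 = flagsOf c0 (c0 :: rest) := by
      simpa using flagFold_key (c0 :: rest) c0 []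
    have hk : (flagsOf c0 (c0 :: rest)).countP id = R.length := by
      rw [countP_flagsOf]
    have hrecs : recsP ((c0 :: rest).zip (flagsOf c0 (c0 :: rest))) = R := recsP_zip _ c0
    have hoths : othersP ((c0 :: rest).zip (flagsOf c0 (c0 :: rest))) = O := othersP_zip _ c0
    have hlen : (c0 :: rest).length = R.length + O.length := by
      rw [hR, hO]; exact (goRO_length (c0 :: rest) c0).symm
    have hsplit : (List.replicate (c0 :: rest).length (none : Option Char)) =
        List.replicate R.length none ++ ([] : List (Option Char)) ++ List.replicate O.length none := by
      rw [hlen, List.replicate_add]; simp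
    have hplace := place_key ((c0 :: rest).zip (flagsOf c0 (c0 :: rest)))
      (List.replicate R.length none) [] (List.replicate O.length none)
      ((R.length : Int) - 1) (R.length : Int)
      (by simp) (by simp) (by simp [hrecs]) (by simp [hoths])
    simp only [hfl, hk]
    rw [hsplit, hplace, hrecs, hoths]
    simp [hA, List.map_map, Function.comp_def]
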